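-- pv_equiv track=rewrite | github.com/JKR8/querytorque_v8 | packages/qt-sql/qt_sql/plan_scanner.py | _format_scan_counts
-- ===== SOURCE A (Python) =====
-- from typing import Any, Dict, List, Optional
--
-- def _format_scan_counts(scan_counts: Dict[str, int]) -> str:
--     """Format scan counts with redundancy detection."""
--     if not scan_counts:
--         return ""
--
--     lines = ["SCAN_COUNTS:"]
--     for table, count in sorted(scan_counts.items(), key=lambda x: -x[1]):
--         suffix = " scan" if count == 1 else " scans"
--         lines.append(f"  {table}: {count}{suffix}")
--
--     # Detect redundant scan opportunities
--     redundant = {t: c for t, c in scan_counts.items() if c > 1}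
--     if redundant:
--         targets = ", ".join(
--             f"{t} ({c}x)" for t, c in
--             sorted(redundant.items(), key=lambda x: -x[1])
--         )
--         lines.append(f"REDUNDANT_SCAN_OPPORTUNITY: {targets} — consolidate into single CTE")
--     else:
--         lines.append("REDUNDANT_SCAN_OPPORTUNITY: none")
--
--     return "\n".join(lines)
-- ===== SOURCE B (Python) =====
-- def _format_scan_counts(scan_counts):
--     """Format scan counts with redundancy detection (one pass, direct string building)."""
--     if not scan_counts:
--         return ""
--
--     out = "SCAN_COUNTS:"
--     reds = ""
--     for t, c in sorted(scan_counts.items(), key=lambda x: -x[1]):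
--         out += "\n  %s: %d scan%s" % (t, c, "" if c == 1 else "s")
--         if c > 1:
--             reds += (", " if reds else "") + "%s (%dx)" % (t, c)
--
--     if reds:
--         return out + "\nREDUNDANT_SCAN_OPPORTUNITY: " + reds + " — consolidate into single CTE"
--     return out + "\nREDUNDANT_SCAN_OPPORTUNITY: none"
-- ===== Notes on version B (the rewrite author's own statement) =====
-- stated objective: simpler
-- what changed: B replaces A's staged pipeline (build a list of lines, a separate redundancy dict-comprehension, a second sort and two joins) by a single forward pass over the once-sorted items that concatenates the report string and the redundant-targets string directly, emitting the ', ' separator inline; stable sort makes the inline-built redundant string equal A's join over its second sort.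
import Mathlib
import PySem

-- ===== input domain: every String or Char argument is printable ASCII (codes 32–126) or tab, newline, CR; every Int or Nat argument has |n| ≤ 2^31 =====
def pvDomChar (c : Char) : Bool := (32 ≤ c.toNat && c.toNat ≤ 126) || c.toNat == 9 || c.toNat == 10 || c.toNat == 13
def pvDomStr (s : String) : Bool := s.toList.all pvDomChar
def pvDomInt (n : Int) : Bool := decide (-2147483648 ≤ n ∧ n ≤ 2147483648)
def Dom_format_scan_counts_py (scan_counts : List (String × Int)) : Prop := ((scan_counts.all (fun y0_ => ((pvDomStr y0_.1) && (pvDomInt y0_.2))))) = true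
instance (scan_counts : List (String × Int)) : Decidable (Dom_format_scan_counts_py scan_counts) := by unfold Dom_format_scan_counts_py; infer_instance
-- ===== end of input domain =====

-- B replaces A's staged pipeline (line list, separate redundancy dict-comprehension,
-- second sort, two joins) by ONE forward pass over the sorted items that concatenates
-- both output strings directly (objective: simpler decomposition; same cost).

-- ===== PORT A =====
-- "  {table}: {count}{suffix}"
def pvLine (tc : String × Int) : List Char :=
  "  ".toList ++ tc.1.toList ++ ": ".toList ++ PySem.Int.toChars tc.2 ++
    (if tc.2 = 1 then " scan".toList else " scans".toList)

-- "{t} ({c}x)"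
def pvRed (tc : String × Int) : List Char :=
  tc.1.toList ++ " (".toList ++ PySem.Int.toChars tc.2 ++ "x)".toList

def format_scan_counts_py (scan_counts : List (String × Int)) : String :=
  -- the parameter is a Python dict: its items in insertion order (duplicate keys overwrite)
  let items := (PySem.Dict.ofList scan_counts).items
  if items = [] then ""
  else
    let lines := ["SCAN_COUNTS:".toList] ++
      (PySem.List.sorted items (fun x => -x.2)).map pvLine
    let redundant := items.filter (fun tc => decide (tc.2 > 1))
    let lines := if redundant ≠ [] then
        lines ++ ["REDUNDANT_SCAN_OPPORTUNITY: ".toList ++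
          PySem.Chars.join ", ".toList
            ((PySem.List.sorted redundant (fun x => -x.2)).map pvRed) ++
          " — consolidate into single CTE".toList]
      else lines ++ ["REDUNDANT_SCAN_OPPORTUNITY: none".toList]
    String.ofList (PySem.Chars.join ['\n'] lines)

-- ===== PORT B =====
def format_scan_counts_py_alt (scan_counts : List (String × Int)) : String :=
  let items := (PySem.Dict.ofList scan_counts).items
  if items = [] then ""
  else
    let st := (PySem.List.sorted items (fun x => -x.2)).foldl
      (fun (st : List Char × List Char) tc =>
        (st.1 ++ ('\n' :: ("  ".toList ++ tc.1.toList ++ ": ".toList ++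
            PySem.Int.toChars tc.2 ++ " scan".toList ++ (if tc.2 = 1 then [] else ['s']))),
         if tc.2 > 1 then
           st.2 ++ (if st.2 ≠ [] then ", ".toList else []) ++
             (tc.1.toList ++ " (".toList ++ PySem.Int.toChars tc.2 ++ "x)".toList)
         else st.2))
      ("SCAN_COUNTS:".toList, [])
    if st.2 ≠ [] then
      String.ofList (st.1 ++ "\nREDUNDANT_SCAN_OPPORTUNITY: ".toList ++ st.2 ++
        " — consolidate into single CTE".toList)
    else
      String.ofList (st.1 ++ "\nREDUNDANT_SCAN_OPPORTUNITY: none".toList)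

-- ===== PRECONDITION & SPEC =====
def Spec_format_scan_counts_py (scan_counts : List (String × Int)) (out : String) : Prop := out = format_scan_counts_py_alt scan_counts
instance (scan_counts : List (String × Int)) (out : String) : Decidable (Spec_format_scan_counts_py scan_counts out) := by unfold Spec_format_scan_counts_py; infer_instance

-- ===== CLAIM (what is proved, stated in full; the proofs are below) =====
def Claim_equal_format_scan_counts_py : Prop := ∀ (scan_counts : List (String × Int)), Dom_format_scan_counts_py scan_counts → Spec_format_scan_counts_py scan_counts (format_scan_counts_py scan_counts)

-- ===== LEMMAS AND PROOFS =====

-- insertBy (the step of PySem's stable insertion sort) prepends when the new element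
-- is strictly before every list element
theorem pv_insertBy_front {α : Type} (key : α → Int) (x : α) (zs : List α)
    (h : ∀ z ∈ zs, key x < key z) :
    PySem.List.insertBy (fun a b => decide (key a < key b)) x zs = x :: zs := by
  cases zs with
  | nil => rfl
  | cons z zs =>
    simp [PySem.List.insertBy, h z (by simp)]

-- insertBy preserves the sortedness invariant of the insertion-sort accumulator
theorem pv_insertBy_pairwise {α : Type} (key : α → Int) (x : α) (ys : List α)
    (h : ys.Pairwise (fun a b => key a ≤ key b)) :
    (PySem.List.insertBy (fun a b => decide (key a < key b)) x ys).Pairwise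
      (fun a b => key a ≤ key b) := by
  induction ys with
  | nil => simp [PySem.List.insertBy]
  | cons y ys ih =>
    rcases List.pairwise_cons.mp h with ⟨hy, hys⟩
    by_cases hxy : key x < key y
    · simp only [PySem.List.insertBy, hxy, decide_true, if_true]
      refine List.pairwise_cons.mpr ⟨?_, h⟩
      intro z hz
      rcases List.mem_cons.mp hz with hz | hz
      · exact hz ▸ le_of_lt hxy
      · exact le_trans (le_of_lt hxy) (hy z hz)
    · simp only [PySem.List.insertBy, hxy, decide_false, Bool.false_eq_true, if_false]
      refine List.pairwise_cons.mpr ⟨?_, ih hys⟩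
      intro z hz
      rcases (PySem.List.mem_insertBy _ _ _ _).mp hz with hz | hz
      · subst hz; omega
      · exact hy z hz

-- filter commutes with a stable insertion step into a sorted accumulator
theorem pv_filter_insertBy {α : Type} (key : α → Int) (p : α → Bool) (x : α) (ys : List α)
    (h : ys.Pairwise (fun a b => key a ≤ key b)) :
    (PySem.List.insertBy (fun a b => decide (key a < key b)) x ys).filter p =
      if p x then
        PySem.List.insertBy (fun a b => decide (key a < key b)) x (ys.filter p)
      else ys.filter p := by
  induction ys with
  | nil => cases hpx : p x <;> simp [PySem.List.insertBy, List.filter, hpx]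
  | cons y ys ih =>
    rcases List.pairwise_cons.mp h with ⟨hy, hys⟩
    by_cases hxy : key x < key y
    · simp only [PySem.List.insertBy, hxy, decide_true, if_true]
      cases hpx : p x with
      | false =>
        simp [List.filter, hpx]
      | true =>
        cases hpy : p y with
        | true => simp [List.filter, hpx, hpy, PySem.List.insertBy, hxy]
        | false =>
          have hfront : ∀ z ∈ ys.filter p, key x < key z := by
            intro z hz
            have hz' := List.mem_of_mem_filter hz
            exact lt_of_lt_of_le hxy (hy z hz')
          simp [List.filter, hpx, hpy, pv_insertBy_front key x _ hfront]
    · simp only [PySem.List.insertBy, hxy, decide_false, Bool.false_eq_true, if_false]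
      cases hpx : p x with
      | false =>
        cases hpy : p y <;> simp_all [List.filter]
      | true =>
        cases hpy : p y with
        | true =>
          simp [List.filter, hpx, hpy, ih hys, PySem.List.insertBy, hxy]
        | false =>
          simp [List.filter, hpx, hpy, ih hys]

-- filter commutes with the whole insertion-sort fold
theorem pv_filter_foldl {α : Type} (key : α → Int) (p : α → Bool) (xs : List α) :
    ∀ acc : List α, acc.Pairwise (fun a b => key a ≤ key b) →
    (xs.foldl (fun acc x => PySem.List.insertBy (fun a b => decide (key a < key b)) x acc) acc).filter p =
      (xs.filter p).foldl (fun acc x => PySem.List.insertBy (fun a b => decide (key a < key b)) x acc) (acc.filter p) := by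
  induction xs with
  | nil => intro acc _; rfl
  | cons x xs ih =>
    intro acc hacc
    have hstep := ih _ (pv_insertBy_pairwise key x acc hacc)
    cases hpx : p x with
    | true =>
      simp [List.foldl, List.filter, hpx, hstep, pv_filter_insertBy key p x acc hacc]
    | false =>
      simp only [List.foldl, List.filter, hpx, hstep,
        pv_filter_insertBy key p x acc hacc, Bool.false_eq_true, if_false]

-- MAIN SORT LEMMA: filtering A's (-count)-sorted list = sorting the filtered items
-- (stable sort keeps ties in insertion order, so the two agree exactly)
theorem pv_filter_sorted {α : Type} (key : α → Int) (p : α → Bool) (xs : List α) :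
    (PySem.List.sorted xs key).filter p = PySem.List.sorted (xs.filter p) key := by
  rw [PySem.List.sorted_eq_foldl_insertBy, PySem.List.sorted_eq_foldl_insertBy]
  simpa using pv_filter_foldl key p xs [] (by simp)

-- a redundant-target string is never empty
theorem pv_red_ne_nil (tc : String × Int) : pvRed tc ≠ [] := by
  simp [pvRed]

-- a ", "-join whose head string is nonempty is nonempty
theorem pv_join_cons_ne_nil (sep x : List Char) (xs : List (List Char)) (hx : x ≠ []) :
    PySem.Chars.join sep (x :: xs) ≠ [] := by
  cases xs with
  | nil => simpa [PySem.Chars.join_singleton] using hx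
  | cons y ys => simp [PySem.Chars.join_cons_cons, hx]

-- the ", "-prefixed rendering of a redundant-target list (what B's loop appends after the first hit)
def pvRedTail (l : List (String × Int)) : List Char :=
  (l.map (fun tc => ", ".toList ++ pvRed tc)).flatten

-- a ", "-join is its head followed by the ", "-prefixed tail
theorem pv_join_head_tail (x : String × Int) (xs : List (String × Int)) :
    PySem.Chars.join ", ".toList ((x :: xs).map pvRed) = pvRed x ++ pvRedTail xs := by
  induction xs generalizing x with
  | nil => simp [PySem.Chars.join_singleton, pvRedTail]
  | cons y ys ih =>
    rw [List.map_cons, List.map_cons, PySem.Chars.join_cons_cons]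
    have h := ih y
    rw [List.map_cons] at h
    rw [h]
    simp [pvRedTail]

-- INVARIANT of B's single pass: the first accumulator collects the '\n'-prefixed lines,
-- the second the ", "-joined redundant targets of the filtered prefix
theorem pv_fold_eq (s : List (String × Int)) : ∀ (l r : List Char),
    s.foldl
      (fun (st : List Char × List Char) tc =>
        (st.1 ++ ('\n' :: ("  ".toList ++ tc.1.toList ++ ": ".toList ++
            PySem.Int.toChars tc.2 ++ " scan".toList ++ (if tc.2 = 1 then [] else ['s']))),
         if tc.2 > 1 then
           st.2 ++ (if st.2 ≠ [] then ", ".toList else []) ++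
             (tc.1.toList ++ " (".toList ++ PySem.Int.toChars tc.2 ++ "x)".toList)
         else st.2)) (l, r) =
      (l ++ (s.map (fun tc => '\n' :: pvLine tc)).flatten,
       if r = [] then
         PySem.Chars.join ", ".toList ((s.filter (fun tc => decide (tc.2 > 1))).map pvRed)
       else r ++ pvRedTail (s.filter (fun tc => decide (tc.2 > 1)))) := by
  induction s with
  | nil => intro l r; by_cases hr : r = [] <;> simp [hr, PySem.Chars.join_nil, pvRedTail]
  | cons tc s ih =>
    intro l r
    obtain ⟨t, c⟩ := tc
    rw [List.foldl_cons, ih]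
    refine Prod.ext (by by_cases h1 : c = 1 <;> simp [pvLine, h1]) ?_
    by_cases hc : c > 1
    · have hfc : List.filter (fun tc => decide (tc.2 > 1)) ((t, c) :: s) =
          (t, c) :: s.filter (fun tc => decide (tc.2 > 1)) := by
        simp [hc]
      by_cases hr : r = []
      · simp only [hr, hc, if_pos, ne_eq, not_true_eq_false, hfc]
        have h := pv_join_head_tail (t, c) (s.filter (fun tc => decide (tc.2 > 1)))
        rw [List.map_cons] at h
        simpa [pvRed] using h.symm
      · simp only [hc, if_pos, ne_eq, hr, not_false_eq_true, hfc]
        have hne : ¬ (r ++ ", ".toList ++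
            (t.toList ++ " (".toList ++ PySem.Int.toChars c ++ "x)".toList) = []) := by
          simp [hr]
        simp [hr, pvRedTail, pvRed]
    · have hfc : List.filter (fun tc => decide (tc.2 > 1)) ((t, c) :: s) =
          s.filter (fun tc => decide (tc.2 > 1)) := by
        simp [hc]
      simp [hc, hfc]

-- '\n'.join written as head ++ flatten of '\n'-prefixed tails
theorem pv_join_newline (x : List Char) (xs : List (List Char)) :
    PySem.Chars.join ['\n'] (x :: xs) = x ++ (xs.map (fun l => '\n' :: l)).flatten := by
  induction xs generalizing x with
  | nil => simp [PySem.Chars.join_singleton]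
  | cons y ys ih =>
    simp [PySem.Chars.join_cons_cons, ih]

-- ===== VERDICT (by name: the statement is the Claim_ definition above) =====
theorem format_scan_counts_py_spec : Claim_equal_format_scan_counts_py := by
  intro scan_counts _
  unfold Spec_format_scan_counts_py format_scan_counts_py format_scan_counts_py_alt
  set items := (PySem.Dict.ofList scan_counts).items with hitems
  by_cases hnil : items = []
  · simp [hnil]
  · simp only [hnil, if_false, pv_fold_eq, ne_eq]
    rw [pv_filter_sorted (fun x : String × Int => -x.2) (fun tc => decide (tc.2 > 1)) items]
    have hjoin : ∀ tail : List Char,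
        PySem.Chars.join ['\n'] (["SCAN_COUNTS:".toList] ++
          (PySem.List.sorted items (fun x => -x.2)).map pvLine ++ [tail]) =
        "SCAN_COUNTS:".toList ++
          (((PySem.List.sorted items (fun x => -x.2)).map (fun tc => '\n' :: pvLine tc)).flatten) ++
          '\n' :: tail := by
      intro tail
      rw [List.singleton_append, List.cons_append, pv_join_newline]
      simp [List.map_append, List.flatten_append, Function.comp_def]
    by_cases hred : items.filter (fun tc => decide (tc.2 > 1)) = []
    · have hs0 : PySem.List.sorted (items.filter (fun tc => decide (tc.2 > 1))) (fun x : String × Int => -x.2) = [] := by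
        rw [PySem.List.sorted_eq_nil_iff]; exact hred
      rw [if_neg (by simpa using hred), if_neg (by simp [hs0, PySem.Chars.join_nil])]
      rw [hjoin]
      simp
    · have hjne : PySem.Chars.join ", ".toList
          ((PySem.List.sorted (items.filter (fun tc => decide (tc.2 > 1))) (fun x => -x.2)).map pvRed) ≠ [] := by
        rcases hl : PySem.List.sorted (items.filter (fun tc => decide (tc.2 > 1))) (fun x : String × Int => -x.2) with _ | ⟨y, ys⟩
        · exact absurd (by rw [PySem.List.sorted_eq_nil_iff] at hl; exact hl) hred
        · rw [List.map_cons]; exact pv_join_cons_ne_nil _ _ _ (pv_red_ne_nil y)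
      rw [if_pos (by simpa using hred), if_pos (by simpa using hjne)]
      rw [hjoin]
      simp
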